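-- pv_equiv track=rewrite | github.com/adriablancafort/problemes-ap2 | dividir-i-vencer/gas_stations.py | min_car_range
-- ===== SOURCE A (Python) =====
-- from typing import List
--
-- def min_car_range(n: int, s: int, lengths: List[int]) -> int:
--     left, right = max(lengths), sum(lengths)
--     ans = right
--
--     while left <= right:
--         mid = (left + right) // 2
--         stops = 0
--         total = 0
--
--         for length in lengths:
--             if total + length > mid:
--                 stops += 1
--                 total = length
--             else:
--                 total += length
--
--         if stops <= s:
--             ans = mid
--             right = mid - 1
--         else:
--             left = mid + 1
--
--     return ans
-- ===== SOURCE B (Python) =====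
-- def min_car_range(n, s, lengths):
--     m = len(lengths)
--     pre = [0]
--     run = 0
--     for x in lengths:
--         run += x
--         pre.append(run)
--     k = s + 1
--     if k < 1:
--         k = 1
--     if k > m:
--         k = m
--     dp = pre[1:]  # best max-segment-sum using at most 1 segment per prefix
--     for _ in range(1, k):
--         ndp = []
--         for i in range(1, m + 1):
--             best = pre[i]
--             for j in range(1, i):
--                 cand = max(dp[j - 1], pre[i] - pre[j])
--                 if cand < best:
--                     best = cand
--             ndp.append(best)
--         dp = ndp
--     return dp[m - 1]
-- ===== Notes on version B (the rewrite author's own statement) =====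
-- stated objective: alternative
-- what changed: Replaces A's binary search over candidate ranges (with a greedy refuel-count feasibility test) by a prefix-sum dynamic program that minimizes the maximum segment sum over partitions into at most s+1 contiguous segments.
-- outside the precondition, e.g. on min_car_range(0, 4, [-7, 10, 3]): A returns 6, B returns 3; on min_car_range(0, 0, []): A raises ValueError, B raises IndexError
import Mathlib
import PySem

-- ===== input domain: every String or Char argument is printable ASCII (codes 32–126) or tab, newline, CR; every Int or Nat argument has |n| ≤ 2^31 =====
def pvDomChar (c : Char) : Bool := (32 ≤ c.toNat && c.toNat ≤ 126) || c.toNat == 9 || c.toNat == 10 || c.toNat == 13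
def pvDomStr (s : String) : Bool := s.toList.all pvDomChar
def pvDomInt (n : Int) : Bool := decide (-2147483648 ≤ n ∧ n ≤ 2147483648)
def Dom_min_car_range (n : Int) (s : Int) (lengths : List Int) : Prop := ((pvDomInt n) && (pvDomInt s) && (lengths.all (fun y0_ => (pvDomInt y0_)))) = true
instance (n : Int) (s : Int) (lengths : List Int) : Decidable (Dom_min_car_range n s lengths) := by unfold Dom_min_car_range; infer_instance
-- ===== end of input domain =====

-- B replaces A's binary search on the answer by a prefix-sum dynamic program over
-- partitions into at most s+1 segments (objective: alternative algorithm, same results).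


-- ===== PORT A =====
-- inner 'for length in lengths' loop of A: state (stops, total)
def pvStepA (mid : Int) (p : Int × Int) (length : Int) : Int × Int :=
  if p.2 + length > mid then (p.1 + 1, length) else (p.1, p.2 + length)

-- A's 'while left <= right' loop, state (left, right, ans)
def pvLoopA (s : Int) (lengths : List Int) (left right ans : Int) : Int :=
  if _h : left ≤ right then
    let mid := PySem.Int.floordiv (left + right) 2
    let st := (lengths.foldl (pvStepA mid) (0, 0)).1
    if st ≤ s then pvLoopA s lengths left (mid - 1) mid
    else pvLoopA s lengths (mid + 1) right ans
  else ans
termination_by (right + 1 - left).toNat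
decreasing_by
  all_goals
    have := PySem.Int.floordiv_two_mid_bounds (lo := left) (hi := right) _h
    omega

def min_car_range (n : Int) (s : Int) (lengths : List Int) : Int :=
  match PySem.List.max? lengths (fun y => y) with
  | none => 0   -- Python raises ValueError on empty lengths; excluded by Pre_
  | some _mx => pvLoopA s lengths _mx lengths.sum lengths.sum

-- ===== PORT B =====
-- Source B's prefix-sum construction: state (run, pre)
def pvPreB (lengths : List Int) : List Int :=
  (lengths.foldl (fun (p : Int × List Int) x => (p.1 + x, p.2 ++ [p.1 + x])) (0, [0])).2

-- Source B's inner 'for j in range(1, i)' loop (indices are always in range; default 0 is never used)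
def pvInnerB (pre dp : List Int) (i : Int) : Int :=
  (PySem.List.pyRange 1 i 1).foldl
    (fun best j =>
      let cand := max (PySem.List.pyGetD dp (j - 1) 0)
                      (PySem.List.pyGetD pre i 0 - PySem.List.pyGetD pre j 0)
      if cand < best then cand else best)
    (PySem.List.pyGetD pre i 0)

-- Source B's 'for i in range(1, m+1)' loop building ndp
def pvRoundB (pre : List Int) (m : Int) (dp : List Int) : List Int :=
  (PySem.List.pyRange 1 (m + 1) 1).foldl (fun ndp i => ndp ++ [pvInnerB pre dp i]) []

def min_car_range_alt (n : Int) (s : Int) (lengths : List Int) : Int :=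
  let m : Int := lengths.length
  let pre := pvPreB lengths
  let k0 := s + 1
  let k1 := if k0 < 1 then 1 else k0
  let k := if k1 > m then m else k1
  let dp0 := PySem.List.slice pre (some 1) none
  let dp := (PySem.List.pyRange 1 k 1).foldl (fun dp _ => pvRoundB pre m dp) dp0
  PySem.List.pyGetD dp (m - 1) 0

-- ===== PRECONDITION & SPEC =====
-- Pre_ excludes the empty list (Python's max([]) raises ValueError there), and, when
-- s > 0, multi-element lists with a negative entry: lengths are distances, and on
-- negative entries A's binary search probes a non-monotone predicate, so its result is
-- an accident of the search path (for s ≤ 0 both programs return sum(lengths), and on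
-- one-element lists both return that element, whatever the signs).
def Pre_min_car_range (n : Int) (s : Int) (lengths : List Int) : Prop :=
  lengths ≠ [] ∧ (lengths.length = 1 ∨ s ≤ 0 ∨ ∀ x ∈ lengths, 0 ≤ x)
instance (n : Int) (s : Int) (lengths : List Int) : Decidable (Pre_min_car_range n s lengths) := by unfold Pre_min_car_range; infer_instance

def pvWitness_min_car_range : Int × Int × List Int := (0, 1, [3, 1, 2])

def Spec_min_car_range (n : Int) (s : Int) (lengths : List Int) (out : Int) : Prop := out = min_car_range_alt n s lengths
instance (n : Int) (s : Int) (lengths : List Int) (out : Int) : Decidable (Spec_min_car_range n s lengths out) := by unfold Spec_min_car_range; infer_instance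

-- ===== CLAIM (what is proved, stated in full; the proofs are below) =====
def Claim_equal_min_car_range : Prop := ∀ (n : Int) (s : Int) (lengths : List Int), Dom_min_car_range n s lengths → Pre_min_car_range n s lengths → Spec_min_car_range n s lengths (min_car_range n s lengths)

-- ===== LEMMAS AND PROOFS =====

-- ---- the greedy refuel-count fold (shared spine of both proofs) ----

def pvStops (v : Int) (xs : List Int) : Int := (xs.foldl (pvStepA v) (0, 0)).1

theorem pvStepA_break (v : Int) (p : Int × Int) (x : Int) (h : p.2 + x > v) :
    pvStepA v p x = (p.1 + 1, x) := by simp [pvStepA, h]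

theorem pvStepA_go (v : Int) (p : Int × Int) (x : Int) (h : ¬ p.2 + x > v) :
    pvStepA v p x = (p.1, p.2 + x) := by simp [pvStepA, h]

theorem pvFold_fst_mono (v : Int) (xs : List Int) : ∀ p : Int × Int, p.1 ≤ (xs.foldl (pvStepA v) p).1 := by
  induction xs with
  | nil => intro p; simp
  | cons x t ih =>
    intro p
    have h := ih (pvStepA v p x)
    simp only [List.foldl_cons]
    refine le_trans ?_ h
    by_cases hb : p.2 + x > v
    · rw [pvStepA_break v p x hb]; omega
    · rw [pvStepA_go v p x hb]

-- after at least one step the running total is ≤ v (whatever the signs of earlier totals)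
theorem pvFold_tot_le_or (v M : Int) (hM : M ≤ v) (xs : List Int) (hx : ∀ x ∈ xs, x ≤ M) :
    ∀ p : Int × Int, (xs.foldl (pvStepA v) p).2 ≤ v ∨ (xs.foldl (pvStepA v) p).2 = p.2 := by
  induction xs with
  | nil => intro p; right; simp
  | cons x t ih =>
    intro p
    have hxM : x ≤ M := hx x (by simp)
    have hstep : (pvStepA v p x).2 ≤ v := by
      by_cases hb : p.2 + x > v
      · rw [pvStepA_break v p x hb]; omega
      · rw [pvStepA_go v p x hb]; omega
    simp only [List.foldl_cons]
    rcases ih (fun y hy => hx y (by simp [hy])) (pvStepA v p x) with h | h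
    · exact Or.inl h
    · exact Or.inl (by omega)

theorem pvFold_tot_le (v M : Int) (hM : M ≤ v) (x : Int) (t : List Int)
    (hx : ∀ y ∈ x :: t, y ≤ M) : ((x :: t).foldl (pvStepA v) (0, 0)).2 ≤ v := by
  have h := pvFold_tot_le_or v M hM (x :: t) hx (0, 0)
  rcases h with h | h
  · exact h
  · -- total equal to the initial 0: then the head step already gave a total ≤ v that never changed
    have hxM : x ≤ M := hx x (by simp)
    have hstep : (pvStepA v (0, 0) x).2 ≤ v := by
      by_cases hb : (0 : Int) + x > v
      · rw [pvStepA_break v (0,0) x hb]; omega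
      · rw [pvStepA_go v (0,0) x hb]; omega
    simp only [List.foldl_cons] at h ⊢
    rcases pvFold_tot_le_or v M hM t (fun y hy => hx y (by simp [hy])) (pvStepA v (0,0) x) with h2 | h2
    · exact h2
    · omega

theorem pvFold_tot_nonneg (v : Int) (xs : List Int) (hx : ∀ x ∈ xs, 0 ≤ x) :
    ∀ p : Int × Int, 0 ≤ p.2 → 0 ≤ (xs.foldl (pvStepA v) p).2 := by
  induction xs with
  | nil => intro p hp; simpa using hp
  | cons x t ih =>
    intro p hp
    have hx0 : 0 ≤ x := hx x (by simp)
    simp only [List.foldl_cons]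
    refine ih (fun y hy => hx y (by simp [hy])) _ ?_
    by_cases hb : p.2 + x > v
    · rw [pvStepA_break v p x hb]; omega
    · rw [pvStepA_go v p x hb]; simp; omega

theorem pvFold_accum (v : Int) (xs : List Int) :
    ∀ p : Int × Int, (xs.foldl (pvStepA v) p).1 = p.1 → (xs.foldl (pvStepA v) p).2 = p.2 + xs.sum := by
  induction xs with
  | nil => intro p _; simp
  | cons x t ih =>
    intro p h
    simp only [List.foldl_cons] at h ⊢
    by_cases hb : p.2 + x > v
    · exfalso
      rw [pvStepA_break v p x hb] at h
      have h1 := pvFold_fst_mono v t (p.1 + 1, x)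
      simp at h1
      omega
    · rw [pvStepA_go v p x hb] at h ⊢
      have := ih (p.1, p.2 + x) (by simpa using h)
      simp at this ⊢
      omega

theorem pvFold_no_break (v : Int) (xs : List Int) (hx : ∀ x ∈ xs, 0 ≤ x) :
    ∀ p : Int × Int, 0 ≤ p.2 → p.2 + xs.sum ≤ v →
      xs.foldl (pvStepA v) p = (p.1, p.2 + xs.sum) := by
  induction xs with
  | nil => intro p _ _; simp
  | cons x t ih =>
    intro p hp hsum
    have hx0 : 0 ≤ x := hx x (by simp)
    have hts : 0 ≤ t.sum := List.sum_nonneg (fun y hy => hx y (by simp [hy]))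
    simp only [List.sum_cons] at hsum
    have hnb : ¬ p.2 + x > v := by omega
    simp only [List.foldl_cons]
    rw [pvStepA_go v p x hnb]
    have := ih (fun y hy => hx y (by simp [hy])) (p.1, p.2 + x) (by simp; omega) (by simp; omega)
    rw [this]
    simp only [List.sum_cons]
    rw [Prod.mk.injEq]
    constructor
    · rfl
    · omega

theorem pvFold_len (v : Int) (xs : List Int) :
    ∀ p : Int × Int, (xs.foldl (pvStepA v) p).1 ≤ p.1 + xs.length := by
  induction xs with
  | nil => intro p; simp
  | cons x t ih =>
    intro p
    have := ih (pvStepA v p x)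
    simp only [List.foldl_cons]
    refine le_trans this ?_
    by_cases hb : p.2 + x > v
    · rw [pvStepA_break v p x hb]; simp; try omega
    · rw [pvStepA_go v p x hb]; simp; try omega

theorem pvFold_chunk (v : Int) (xs : List Int) (hx : ∀ x ∈ xs, 0 ≤ x) (hsum : xs.sum ≤ v) :
    ∀ p : Int × Int, 0 ≤ p.2 → (xs.foldl (pvStepA v) p).1 ≤ p.1 + 1 := by
  induction xs with
  | nil => intro p _; simp
  | cons x t ih =>
    intro p hp
    have hx0 : 0 ≤ x := hx x (by simp)
    have hts : 0 ≤ t.sum := List.sum_nonneg (fun y hy => hx y (by simp [hy]))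
    simp only [List.sum_cons] at hsum
    simp only [List.foldl_cons]
    by_cases hb : p.2 + x > v
    · rw [pvStepA_break v p x hb]
      have := pvFold_no_break v t (fun y hy => hx y (by simp [hy])) (p.1 + 1, x)
        (by simp; omega) (by simp; omega)
      rw [this]
    · rw [pvStepA_go v p x hb]
      exact le_trans (ih (fun y hy => hx y (by simp [hy])) (by omega) (p.1, p.2 + x) (by simp; omega)) (by simp)

theorem pvFold_anti (v w : Int) (hvw : v ≤ w) (xs : List Int) (hx : ∀ x ∈ xs, 0 ≤ x) :
    ∀ p q : Int × Int, 0 ≤ p.2 → 0 ≤ q.2 →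
      (q.1 < p.1 ∨ (q.1 = p.1 ∧ q.2 ≤ p.2)) →
      ((xs.foldl (pvStepA w) q).1 < (xs.foldl (pvStepA v) p).1 ∨
        ((xs.foldl (pvStepA w) q).1 = (xs.foldl (pvStepA v) p).1 ∧
          (xs.foldl (pvStepA w) q).2 ≤ (xs.foldl (pvStepA v) p).2)) := by
  induction xs with
  | nil => intro p q _ _ h; simpa using h
  | cons x t ih =>
    intro p q hp hq h
    have hx0 : 0 ≤ x := hx x (by simp)
    simp only [List.foldl_cons]
    refine ih (fun y hy => hx y (by simp [hy])) (pvStepA v p x) (pvStepA w q x) ?_ ?_ ?_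
    · by_cases hb : p.2 + x > v
      · rw [pvStepA_break v p x hb]; omega
      · rw [pvStepA_go v p x hb]; simp; omega
    · by_cases hb : q.2 + x > w
      · rw [pvStepA_break w q x hb]; omega
      · rw [pvStepA_go w q x hb]; simp; omega
    · by_cases hbp : p.2 + x > v <;> by_cases hbq : q.2 + x > w
      · rw [pvStepA_break v p x hbp, pvStepA_break w q x hbq]
        dsimp only
        rcases h with h | ⟨h1, h2⟩ <;> omega
      · rw [pvStepA_break v p x hbp, pvStepA_go w q x hbq]
        dsimp only
        rcases h with h | ⟨h1, h2⟩ <;> omega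
      · rw [pvStepA_go v p x hbp, pvStepA_break w q x hbq]
        dsimp only
        rcases h with h | ⟨h1, h2⟩ <;> omega
      · rw [pvStepA_go v p x hbp, pvStepA_go w q x hbq]
        dsimp only
        rcases h with h | ⟨h1, h2⟩ <;> omega

theorem pvStops_nonneg (v : Int) (xs : List Int) : 0 ≤ pvStops v xs := by
  have := pvFold_fst_mono v xs (0, 0)
  simpa [pvStops] using this

theorem pvStops_anti (v w : Int) (hvw : v ≤ w) (xs : List Int) (hx : ∀ x ∈ xs, 0 ≤ x) :
    pvStops w xs ≤ pvStops v xs := by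
  have := pvFold_anti v w hvw xs hx (0, 0) (0, 0) (le_refl 0) (le_refl 0) (by simp)
  unfold pvStops
  rcases this with h | ⟨h, _⟩ <;> omega

theorem pvStops_zero_sum (v : Int) (x : Int) (t : List Int)
    (hx : ∀ y ∈ x :: t, y ≤ v) (h : pvStops v (x :: t) = 0) : (x :: t).sum ≤ v := by
  have ha := pvFold_accum v (x :: t) (0, 0) (by simpa [pvStops] using h)
  have hb := pvFold_tot_le v v (le_refl v) x t hx
  simp only at ha
  omega

theorem pvStops_of_sum_le (v : Int) (xs : List Int) (hx : ∀ x ∈ xs, 0 ≤ x)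
    (hsum : xs.sum ≤ v) : pvStops v xs = 0 := by
  have := pvFold_no_break v xs hx (0, 0) (by simp) (by simpa using hsum)
  simp [pvStops, this]

theorem pvStops_le_len (v : Int) (x : Int) (t : List Int) (hx : x ≤ v) :
    pvStops v (x :: t) ≤ t.length := by
  unfold pvStops
  have hnb : ¬ (0 : Int) + x > v := by omega
  simp only [List.foldl_cons]
  rw [pvStepA_go v (0,0) x hnb]
  have := pvFold_len v t (0, 0 + x)
  simpa using this

theorem pvFold_last_break (v : Int) (xs : List Int) (hx : ∀ x ∈ xs, 0 ≤ x) :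
    ∀ p : Int × Int, 0 ≤ p.2 → p.1 < (xs.foldl (pvStepA v) p).1 →
      ∃ as b bs, xs = as ++ b :: bs ∧
        ((as.foldl (pvStepA v) p).1) + 1 = (xs.foldl (pvStepA v) p).1 ∧
        (as.foldl (pvStepA v) p).2 + b > v ∧
        (xs.foldl (pvStepA v) p).2 = b + bs.sum := by
  induction xs with
  | nil => intro p _ h; simp at h
  | cons x t ih =>
    intro p hp h
    have hx0 : 0 ≤ x := hx x (by simp)
    simp only [List.foldl_cons] at h ⊢
    by_cases hb : p.2 + x > v
    · rw [pvStepA_break v p x hb] at h ⊢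
      by_cases h2 : (p.1 + 1 : Int) < (t.foldl (pvStepA v) (p.1 + 1, x)).1
      · obtain ⟨as, b, bs, he, h1, hbk, htot⟩ :=
          ih (fun y hy => hx y (by simp [hy])) (p.1 + 1, x) (by simp; omega) (by simpa using h2)
        refine ⟨x :: as, b, bs, by simp [he], ?_, ?_, ?_⟩
        · simp only [List.foldl_cons]; rw [pvStepA_break v p x hb]; exact h1
        · simp only [List.foldl_cons]; rw [pvStepA_break v p x hb]; exact hbk
        · exact htot
      · have hm := pvFold_fst_mono v t (p.1 + 1, x)
        simp only at hm
        have heq : (t.foldl (pvStepA v) (p.1 + 1, x)).1 = p.1 + 1 := by omega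
        have hacc := pvFold_accum v t (p.1 + 1, x) (by simpa using heq)
        refine ⟨[], x, t, by simp, ?_, ?_, ?_⟩
        · simp only [List.foldl_nil]; omega
        · simp only [List.foldl_nil]; omega
        · simp only at hacc; omega
    · rw [pvStepA_go v p x hb] at h ⊢
      obtain ⟨as, b, bs, he, h1, hbk, htot⟩ :=
        ih (fun y hy => hx y (by simp [hy])) (p.1, p.2 + x) (by simp; omega) (by simpa using h)
      refine ⟨x :: as, b, bs, by simp [he], ?_, ?_, ?_⟩
      · simp only [List.foldl_cons]; rw [pvStepA_go v p x hb]; exact h1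
      · simp only [List.foldl_cons]; rw [pvStepA_go v p x hb]; exact hbk
      · exact htot

theorem pvStops_pos_split (v : Int) (xs : List Int)
    (hnn : ∀ x ∈ xs, 0 ≤ x) (hx : ∀ x ∈ xs, x ≤ v) (h : 0 < pvStops v xs) :
    ∃ as b bs, xs = as ++ b :: bs ∧ as ≠ [] ∧
      pvStops v as + 1 = pvStops v xs ∧ b + bs.sum ≤ v := by
  obtain ⟨as, b, bs, he, h1, hbk, htot⟩ :=
    pvFold_last_break v xs hnn (0, 0) (by simp) (by simpa [pvStops] using h)
  have hxe : xs ≠ [] := by rw [he]; simp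
  obtain ⟨x0, t0, hxt⟩ := List.exists_cons_of_ne_nil hxe
  have htl : (xs.foldl (pvStepA v) (0, 0)).2 ≤ v := by
    rw [hxt]; exact pvFold_tot_le v v (le_refl v) x0 t0 (fun y hy => hx y (by rw [hxt]; exact hy))
  refine ⟨as, b, bs, he, ?_, by simpa [pvStops] using h1, by omega⟩
  rintro rfl
  have hbM : b ≤ v := hx b (by simp [he])
  simp at hbk
  omega

-- ---- B's prefix-sum list ----

theorem pvPreB_fold (xs : List Int) : ∀ (r : Int) (acc : List Int),
    xs.foldl (fun (p : Int × List Int) x => (p.1 + x, p.2 ++ [p.1 + x])) (r, acc)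
      = (r + xs.sum, acc ++ (List.range xs.length).map (fun j => r + ((xs.take (j + 1)).sum))) := by
  induction xs with
  | nil => intro r acc; simp
  | cons x t ih =>
    intro r acc
    simp only [List.foldl_cons]
    rw [ih (r + x) (acc ++ [r + x])]
    rw [Prod.mk.injEq]
    constructor
    · simp only [List.sum_cons]; ring
    · rw [List.length_cons, List.range_succ_eq_map, List.map_cons, List.map_map]
      simp only [List.take_succ_cons, List.sum_cons, List.append_assoc, List.singleton_append]
      congr 2
      all_goals try simp
      all_goals intro a _
      all_goals ring

theorem pvPreB_eq (xs : List Int) :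
    pvPreB xs = 0 :: (List.range xs.length).map (fun j => (xs.take (j + 1)).sum) := by
  unfold pvPreB
  rw [pvPreB_fold xs 0 [0]]
  simp

theorem pvPreB_getD (xs : List Int) (j : Nat) (hj : j ≤ xs.length) :
    (pvPreB xs).getD j 0 = (xs.take j).sum := by
  rw [pvPreB_eq]
  cases j with
  | zero => simp
  | succ j =>
    have hj' : j < xs.length := by omega
    simp [List.getD, hj']

theorem pvPreB_pyGetD (xs : List Int) (i : Int) (h0 : 0 ≤ i) (h1 : i ≤ (xs.length : Int)) :
    PySem.List.pyGetD (pvPreB xs) i 0 = (xs.take i.toNat).sum := by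
  have hi : i = ((i.toNat : Nat) : Int) := by omega
  rw [hi, PySem.List.pyGetD_natCast]
  exact pvPreB_getD xs i.toNat (by omega)

theorem pvPreB_tail (xs : List Int) :
    PySem.List.slice (pvPreB xs) (some 1) none
      = (List.range xs.length).map (fun j => (xs.take (j + 1)).sum) := by
  rw [PySem.List.slice_from_one, pvPreB_eq]
  rfl

-- ---- the running-minimum fold of Source B's inner loop ----

theorem pvMinFold_le_init (f : Int → Int) (l : List Int) : ∀ a : Int,
    l.foldl (fun b j => if f j < b then f j else b) a ≤ a := by
  induction l with
  | nil => intro a; simp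
  | cons x t ih =>
    intro a
    simp only [List.foldl_cons]
    refine le_trans (ih _) ?_
    split <;> omega

theorem pvMinFold_le_mem (f : Int → Int) (l : List Int) : ∀ (a j : Int), j ∈ l →
    l.foldl (fun b j => if f j < b then f j else b) a ≤ f j := by
  induction l with
  | nil => intro a j h; simp at h
  | cons x t ih =>
    intro a j h
    simp only [List.foldl_cons]
    rcases List.mem_cons.mp h with rfl | h
    · refine le_trans (pvMinFold_le_init f t _) ?_
      split <;> omega
    · exact ih _ j h

theorem pvMinFold_cases (f : Int → Int) (l : List Int) : ∀ a : Int,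
    l.foldl (fun b j => if f j < b then f j else b) a = a ∨
      ∃ j ∈ l, l.foldl (fun b j => if f j < b then f j else b) a = f j := by
  induction l with
  | nil => intro a; left; simp
  | cons x t ih =>
    intro a
    simp only [List.foldl_cons]
    by_cases hb : f x < a
    · rw [if_pos hb]
      rcases ih (f x) with h | ⟨j, hj, h⟩
      · exact Or.inr ⟨x, by simp, h⟩
      · exact Or.inr ⟨j, by simp [hj], h⟩
    · rw [if_neg hb]
      rcases ih a with h | ⟨j, hj, h⟩
      · exact Or.inl h
      · exact Or.inr ⟨j, by simp [hj], h⟩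

-- ---- optimality notions ----

def pvGood (k v : Int) (xs : List Int) : Prop := (∀ x ∈ xs, x ≤ v) ∧ pvStops v xs < k

def pvBest (k v : Int) (xs : List Int) : Prop := pvGood k v xs ∧ ∀ w, pvGood k w xs → v ≤ w

-- one DP cell: Source B's inner loop computes the optimum for the prefix of length i
theorem pvInner_best (lengths : List Int) (hnn : ∀ x ∈ lengths, 0 ≤ x)
    (r : Int) (hr : 1 ≤ r) (dp : List Int) (hlen : dp.length = lengths.length)
    (hInv : ∀ j : Nat, j < lengths.length → pvBest r (dp.getD j 0) (lengths.take (j + 1)))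
    (i : Int) (h1 : 1 ≤ i) (h2 : i ≤ (lengths.length : Int)) :
    pvBest (r + 1) (pvInnerB (pvPreB lengths) dp i) (lengths.take i.toNat) := by
  have hpre_i : PySem.List.pyGetD (pvPreB lengths) i 0 = (lengths.take i.toNat).sum :=
    pvPreB_pyGetD lengths i (by omega) h2
  set ti := lengths.take i.toNat with hti
  have htisub : ∀ x ∈ ti, x ∈ lengths := fun x hx => List.mem_of_mem_take hx
  have htinn : ∀ x ∈ ti, 0 ≤ x := fun x hx => hnn x (htisub x hx)
  have htilen : ti.length = i.toNat := by
    rw [hti, List.length_take]; omega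
  have htine : ti ≠ [] := by
    intro h; rw [h] at htilen; simp at htilen; omega
  set F : Int → Int := fun j =>
    max (PySem.List.pyGetD dp (j - 1) 0) ((lengths.take i.toNat).sum - PySem.List.pyGetD (pvPreB lengths) j 0) with hF
  have hEq : pvInnerB (pvPreB lengths) dp i
      = (PySem.List.pyRange 1 i 1).foldl (fun b j => if F j < b then F j else b) ti.sum := by
    simp only [pvInnerB, hpre_i, hF, hti]
  -- decompositions for a cut position 1 ≤ j < i
  have hcut : ∀ jn : Nat, 1 ≤ jn → jn < i.toNat →
      (PySem.List.pyGetD (pvPreB lengths) (jn : Int) 0 = (lengths.take jn).sum) ∧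
      lengths.take jn ++ ti.drop jn = ti ∧
      (ti.drop jn).sum = ti.sum - (lengths.take jn).sum := by
    intro jn hj1 hj2
    have hjm : (jn : Int) ≤ (lengths.length : Int) := by omega
    have hg := pvPreB_pyGetD lengths (jn : Int) (by omega) hjm
    simp only [Int.toNat_natCast] at hg
    have htk : ti.take jn = lengths.take jn := by
      rw [hti, List.take_take]
      congr 1
      omega
    have happ : ti.take jn ++ ti.drop jn = ti := List.take_append_drop jn ti
    have hsum : (ti.take jn).sum + (ti.drop jn).sum = ti.sum := by
      conv_rhs => rw [← happ]
      rw [List.sum_append]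
    rw [htk] at happ hsum
    exact ⟨hg, happ, by omega⟩
  constructor
  · -- the computed value is feasible
    rw [hEq]
    rcases pvMinFold_cases F (PySem.List.pyRange 1 i 1) ti.sum with hc | ⟨j, hjmem, hc⟩
    · rw [hc]
      refine ⟨fun x hx => List.single_le_sum htinn x hx, ?_⟩
      have : pvStops ti.sum ti = 0 := pvStops_of_sum_le _ _ htinn (le_refl _)
      omega
    · rw [hc]
      obtain ⟨hj1, hj2⟩ := (PySem.List.mem_pyRange_one).mp hjmem
      have hjn : j = ((j.toNat : Nat) : Int) := by omega
      set jn := j.toNat with hjndef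
      have hjn1 : 1 ≤ jn := by omega
      have hjn2 : jn < i.toNat := by omega
      obtain ⟨hgj, happ, hsumd⟩ := hcut jn hjn1 hjn2
      have hdpj : PySem.List.pyGetD dp (j - 1) 0 = dp.getD (jn - 1) 0 := by
        have : j - 1 = (((jn - 1 : Nat) : Nat) : Int) := by omega
        rw [this, PySem.List.pyGetD_natCast]
      have hBj := hInv (jn - 1) (by omega)
      have hjadd : jn - 1 + 1 = jn := by omega
      rw [hjadd] at hBj
      have hFj : F j = max (dp.getD (jn - 1) 0) ((ti.drop jn).sum) := by
        rw [hF]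
        simp only
        rw [hdpj]
        rw [hjn, hgj]
        rw [← hti, hsumd]
      rw [hFj]
      set dj := dp.getD (jn - 1) 0 with hdj
      set cs := (ti.drop jn).sum with hcs
      have hnncj : ∀ x ∈ ti.drop jn, 0 ≤ x := fun x hx => htinn x (List.mem_of_mem_drop hx)
      have hnntj : ∀ x ∈ lengths.take jn, 0 ≤ x := fun x hx => hnn x (List.mem_of_mem_take hx)
      constructor
      · -- every element of ti is ≤ the candidate
        intro x hx
        rw [← happ] at hx
        rcases List.mem_append.mp hx with hx | hx
        · exact le_trans (hBj.1.1 x hx) (le_max_left _ _)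
        · exact le_trans (List.single_le_sum hnncj x hx) (le_max_right _ _)
      · -- and the greedy count stays below r + 1
        set v := max dj cs with hv
        have hdjv : dj ≤ v := le_max_left _ _
        have hcsv : cs ≤ v := le_max_right _ _
        have hsttj : pvStops v (lengths.take jn) < r := by
          have h1' := pvStops_anti dj v hdjv (lengths.take jn) hnntj
          have h2' := hBj.1.2
          omega
        -- fold over ti = take jn ++ drop jn
        have hfold : pvStops v ti
            = ((ti.drop jn).foldl (pvStepA v) ((lengths.take jn).foldl (pvStepA v) (0, 0))).1 := by
          conv_lhs => rw [pvStops, ← happ]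
          rw [List.foldl_append]
        have htot0 : 0 ≤ ((lengths.take jn).foldl (pvStepA v) (0, 0)).2 :=
          pvFold_tot_nonneg v (lengths.take jn) hnntj (0, 0) (by simp)
        have hch := pvFold_chunk v (ti.drop jn) hnncj hcsv ((lengths.take jn).foldl (pvStepA v) (0, 0)) htot0
        rw [hfold]
        have : ((lengths.take jn).foldl (pvStepA v) (0, 0)).1 = pvStops v (lengths.take jn) := rfl
        omega
  · -- minimality
    intro w hGw
    obtain ⟨hwel, hwst⟩ := hGw
    rw [hEq]
    by_cases h0 : pvStops w ti = 0
    · obtain ⟨x0, t0, hxt⟩ := List.exists_cons_of_ne_nil htine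
      have hsw : ti.sum ≤ w := by
        rw [hxt] at h0 ⊢
        exact pvStops_zero_sum w x0 t0 (fun y hy => hwel y (by rw [hxt]; exact hy)) h0
      exact le_trans (pvMinFold_le_init F (PySem.List.pyRange 1 i 1) ti.sum) hsw
    · have hpos : 0 < pvStops w ti := by
        have := pvStops_nonneg w ti
        omega
      obtain ⟨as, b, bs, he, hane, hsplit, hbnd⟩ := pvStops_pos_split w ti htinn hwel hpos
      set jn := as.length with hjn
      have hjn1 : 1 ≤ jn := by
        rcases as with _ | ⟨a, t⟩
        · exact absurd rfl hane
        · simp [hjn]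
      have hlti : ti.length = as.length + (b :: bs).length := by rw [he]; simp
      have hjn2 : jn < i.toNat := by
        rw [htilen] at hlti
        simp at hlti
        omega
      obtain ⟨hgj, happ, hsumd⟩ := hcut jn hjn1 hjn2
      have has : as = lengths.take jn := by
        have h1' : ti.take jn = as := by rw [he, hjn, List.take_left]
        have h2' : ti.take jn = lengths.take jn := by
          rw [hti, List.take_take]
          congr 1
          omega
        rw [← h1', h2']
      -- the cut candidate F jn is ≤ w
      have hmem : ((jn : Nat) : Int) ∈ PySem.List.pyRange 1 i 1 := by
        rw [PySem.List.mem_pyRange_one]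
        omega
    -- dp value at the cut
      have hBj := hInv (jn - 1) (by omega)
      have hjadd : jn - 1 + 1 = jn := by omega
      rw [hjadd] at hBj
      have hdpw : dp.getD (jn - 1) 0 ≤ w := by
        refine hBj.2 w ⟨?_, ?_⟩
        · intro x hx
          refine hwel x ?_
          rw [← has] at hx
          rw [he]
          exact List.mem_append.mpr (Or.inl hx)
        · have h3 : pvStops w as + 1 < r + 1 := by rw [hsplit]; exact hwst
          rw [has] at h3
          omega
      have hchw : ti.sum - (lengths.take jn).sum ≤ w := by
        have hsum2 : ti.sum = as.sum + (b + bs.sum) := by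
          rw [he]
          simp
        rw [← has]
        omega
      have hFw : F ((jn : Nat) : Int) ≤ w := by
        rw [hF]
        simp only
        have hc1 : ((jn : Nat) : Int) - 1 = (((jn - 1 : Nat) : Nat) : Int) := by omega
        rw [hc1, PySem.List.pyGetD_natCast, hgj]
        rw [← hti]
        exact max_le hdpw hchw
      exact le_trans (pvMinFold_le_mem F (PySem.List.pyRange 1 i 1) ti.sum ((jn : Nat) : Int) hmem) hFw

-- one round of Source B's middle loop
theorem pvRound_eq (pre : List Int) (m : Int) (dp : List Int) :
    pvRoundB pre m dp = (PySem.List.pyRange 1 (m + 1) 1).map (pvInnerB pre dp) := by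
  unfold pvRoundB
  rw [PySem.List.foldl_append_singleton_eq_map]
  simp

theorem pvRound_inv (lengths : List Int) (hnn : ∀ x ∈ lengths, 0 ≤ x)
    (r : Int) (hr : 1 ≤ r) (dp : List Int) (hlen : dp.length = lengths.length)
    (hInv : ∀ j : Nat, j < lengths.length → pvBest r (dp.getD j 0) (lengths.take (j + 1))) :
    (pvRoundB (pvPreB lengths) (lengths.length : Int) dp).length = lengths.length ∧
    ∀ j : Nat, j < lengths.length →
      pvBest (r + 1) ((pvRoundB (pvPreB lengths) (lengths.length : Int) dp).getD j 0)
        (lengths.take (j + 1)) := by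
  rw [pvRound_eq]
  have hlenr : (PySem.List.pyRange 1 ((lengths.length : Int) + 1) 1).length = lengths.length := by
    rw [PySem.List.length_pyRange_one]; omega
  constructor
  · simp [hlenr]
  · intro j hj
    have hjlt : j < (PySem.List.pyRange 1 ((lengths.length : Int) + 1) 1).length := by omega
    have hgd : ((PySem.List.pyRange 1 ((lengths.length : Int) + 1) 1).map (pvInnerB (pvPreB lengths) dp)).getD j 0
        = pvInnerB (pvPreB lengths) dp (1 + (j : Int)) := by
      rw [List.getD_eq_getElem _ _ (by simpa using hjlt)]
      rw [List.getElem_map]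
      rw [PySem.List.getElem_pyRange_one]
    rw [hgd]
    have := pvInner_best lengths hnn r hr dp hlen hInv (1 + (j : Int)) (by omega) (by omega)
    have ht : (1 + (j : Int)).toNat = j + 1 := by omega
    rw [ht] at this
    exact this

-- iterating rounds
theorem pvIter_inv (lengths : List Int) (hnn : ∀ x ∈ lengths, 0 ≤ x) (l : List Int) :
    ∀ (r : Int) (dp : List Int), 1 ≤ r → dp.length = lengths.length →
    (∀ j : Nat, j < lengths.length → pvBest r (dp.getD j 0) (lengths.take (j + 1))) →
    ((l.foldl (fun d _ => pvRoundB (pvPreB lengths) (lengths.length : Int) d) dp).length = lengths.length ∧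
      ∀ j : Nat, j < lengths.length →
        pvBest (r + (l.length : Int))
          ((l.foldl (fun d _ => pvRoundB (pvPreB lengths) (lengths.length : Int) d) dp).getD j 0)
          (lengths.take (j + 1))) := by
  induction l with
  | nil => intro r dp hr hlen hInv; simpa using ⟨hlen, hInv⟩
  | cons x t ih =>
    intro r dp hr hlen hInv
    obtain ⟨hlen', hInv'⟩ := pvRound_inv lengths hnn r hr dp hlen hInv
    have := ih (r + 1) _ (by omega) hlen' hInv'
    simp only [List.foldl_cons, List.length_cons]
    refine ⟨this.1, fun j hj => ?_⟩
    have h2 := this.2 j hj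
    have : r + 1 + (t.length : Int) = r + ((t.length + 1 : Nat) : Int) := by push_cast; ring
    rwa [this] at h2

-- the initial dp (prefix sums themselves) is optimal for one segment
theorem pvInit_inv (lengths : List Int) (hnn : ∀ x ∈ lengths, 0 ≤ x) :
    (PySem.List.slice (pvPreB lengths) (some 1) none).length = lengths.length ∧
    ∀ j : Nat, j < lengths.length →
      pvBest 1 ((PySem.List.slice (pvPreB lengths) (some 1) none).getD j 0)
        (lengths.take (j + 1)) := by
  rw [pvPreB_tail]
  constructor
  · simp
  · intro j hj
    have hgd : ((List.range lengths.length).map (fun j => (lengths.take (j + 1)).sum)).getD j 0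
        = (lengths.take (j + 1)).sum := by
      rw [List.getD_eq_getElem _ _ (by simpa using hj)]
      simp
    rw [hgd]
    set ti := lengths.take (j + 1) with hti
    have htine : ti ≠ [] := by
      rw [hti]
      have : lengths ≠ [] := by rintro rfl; simp at hj
      simp [List.take_eq_nil_iff]
      omega
    have hsub : ∀ x ∈ ti, x ∈ lengths := fun x hx => List.mem_of_mem_take hx
    constructor
    · constructor
      · intro x hx
        refine le_trans (le_refl x) ?_
        exact List.single_le_sum (fun y hy => hnn y (hsub y hy)) x hx
      · have : pvStops ti.sum ti = 0 := pvStops_of_sum_le _ _ (fun y hy => hnn y (hsub y hy)) (le_refl _)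
        omega
    · intro w ⟨hwel, hwst⟩
      have h0 : pvStops w ti = 0 := by
        have := pvStops_nonneg w ti
        omega
      obtain ⟨x0, t0, hxt⟩ := List.exists_cons_of_ne_nil htine
      rw [hxt] at h0 hwel ⊢
      exact pvStops_zero_sum w x0 t0 hwel h0

-- Source B's k as a function of s and the list
def pvK (s : Int) (lengths : List Int) : Int :=
  let m : Int := lengths.length
  let k1 := if s + 1 < 1 then 1 else s + 1
  if k1 > m then m else k1

-- the value B returns is the optimum over partitions into at most pvK parts
theorem pvAlt_best (n s : Int) (lengths : List Int) (hne : lengths ≠ [])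
    (hnn : ∀ x ∈ lengths, 0 ≤ x) :
    pvBest (pvK s lengths) (min_car_range_alt n s lengths) lengths := by
  have hm1 : 1 ≤ lengths.length := List.length_pos_of_ne_nil hne
  obtain ⟨hlen0, hInv0⟩ := pvInit_inv lengths hnn
  have hk1 : 1 ≤ pvK s lengths := by unfold pvK; dsimp only; split_ifs <;> omega
  have hkm : pvK s lengths ≤ (lengths.length : Int) := by
    unfold pvK; dsimp only; split_ifs <;> omega
  have hiter := pvIter_inv lengths hnn (PySem.List.pyRange 1 (pvK s lengths) 1) 1
      (PySem.List.slice (pvPreB lengths) (some 1) none) (le_refl 1) hlen0 hInv0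
  have hlr : ((PySem.List.pyRange 1 (pvK s lengths) 1).length : Int) = pvK s lengths - 1 := by
    rw [PySem.List.length_pyRange_one]; omega
  rw [hlr] at hiter
  have hkk : (1 : Int) + (pvK s lengths - 1) = pvK s lengths := by ring
  rw [hkk] at hiter
  obtain ⟨hlend, hInvd⟩ := hiter
  have hout : min_car_range_alt n s lengths
      = ((PySem.List.pyRange 1 (pvK s lengths) 1).foldl
          (fun d _ => pvRoundB (pvPreB lengths) (lengths.length : Int) d)
          (PySem.List.slice (pvPreB lengths) (some 1) none)).getD (lengths.length - 1) 0 := by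
    simp only [min_car_range_alt, pvK]
    have hc : (lengths.length : Int) - 1 = (((lengths.length - 1 : Nat) : Nat) : Int) := by omega
    rw [hc, PySem.List.pyGetD_natCast]
  rw [hout]
  have := hInvd (lengths.length - 1) (by omega)
  have hc2 : lengths.length - 1 + 1 = lengths.length := by omega
  rw [hc2, List.take_length] at this
  exact this

-- for s ≤ 0 B returns the plain sum whatever the signs
theorem pvAlt_sum (n s : Int) (lengths : List Int) (hne : lengths ≠ []) (hs : s ≤ 0) :
    min_car_range_alt n s lengths = lengths.sum := by
  have hm1 : 1 ≤ lengths.length := List.length_pos_of_ne_nil hne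
  simp only [min_car_range_alt]
  have hk1 : (if s + 1 < 1 then (1 : Int) else s + 1) = 1 := by split <;> omega
  rw [hk1, if_neg (by omega : ¬ (1 : Int) > (lengths.length : Int))]
  have hrange : PySem.List.pyRange 1 1 1 = [] := by
    rw [PySem.List.pyRange_one]; simp
  rw [hrange, List.foldl_nil, pvPreB_tail]
  have hc : (lengths.length : Int) - 1 = (((lengths.length - 1 : Nat) : Nat) : Int) := by omega
  rw [hc, PySem.List.pyGetD_natCast]
  rw [List.getD_eq_getElem _ _ (by simp; omega)]
  simp only [List.getElem_map, List.getElem_range]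
  have hc2 : lengths.length - 1 + 1 = lengths.length := by omega
  rw [hc2, List.take_length]

-- ---- A's binary search ----

theorem pvLoopA_sum (s : Int) (lengths : List Int) (M : Int) (hs : s ≤ 0)
    (hmax : ∀ x ∈ lengths, x ≤ M) (hne : lengths ≠ []) :
    ∀ (t : Nat) (left right : Int), (right + 1 - left).toNat = t → M ≤ left →
      right ≤ lengths.sum → pvLoopA s lengths left right lengths.sum = lengths.sum := by
  intro t
  induction t using Nat.strong_induction_on with
  | _ t ih =>
    intro left right hmeas hleft hright
    rw [pvLoopA]
    split
    case isTrue hlr =>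
      have hmid := PySem.Int.floordiv_two_mid_bounds (lo := left) (hi := right) hlr
      set mid := PySem.Int.floordiv (left + right) 2 with hmid_def
      dsimp only
      split
      case isTrue hfeas =>
        -- a feasible midpoint can only be the sum itself
        have hst0 : pvStops mid lengths = 0 := by
          have := pvStops_nonneg mid lengths
          have : (lengths.foldl (pvStepA mid) (0, 0)).1 = pvStops mid lengths := rfl
          omega
        obtain ⟨x0, t0, hxt⟩ := List.exists_cons_of_ne_nil hne
        have hsum_le : lengths.sum ≤ mid := by
          rw [hxt] at hst0 ⊢
          exact pvStops_zero_sum mid x0 t0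
            (fun y hy => le_trans (hmax y (by rw [hxt]; exact hy)) (by omega)) hst0
        have hmid_eq : mid = lengths.sum := by omega
        rw [hmid_eq]
        exact ih (lengths.sum - 1 + 1 - left).toNat (by omega) left (lengths.sum - 1) rfl hleft
          (by omega)
      case isFalse hinf =>
        exact ih (right + 1 - (mid + 1)).toNat (by omega) (mid + 1) right rfl (by omega) hright
    case isFalse hlr => rfl

theorem pvLoopA_main (s : Int) (lengths : List Int) (M : Int)
    (hnn : ∀ x ∈ lengths, 0 ≤ x) (hmax : ∀ x ∈ lengths, x ≤ M) :
    ∀ (t : Nat) (left right ans : Int), (right + 1 - left).toNat = t →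
      M ≤ left → right ≤ lengths.sum →
      (∀ w, M ≤ w → w < left → ¬ (pvStops w lengths ≤ s)) →
      (∀ w, right < w → M ≤ w → pvStops w lengths ≤ s → ans ≤ w) →
      (pvStops ans lengths ≤ max s 0 ∧ M ≤ ans ∧ ans ≤ lengths.sum) →
      (pvStops (pvLoopA s lengths left right ans) lengths ≤ max s 0 ∧
        M ≤ pvLoopA s lengths left right ans ∧
        pvLoopA s lengths left right ans ≤ lengths.sum ∧
        ∀ w, M ≤ w → pvStops w lengths ≤ s → pvLoopA s lengths left right ans ≤ w) := by
  intro t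
  induction t using Nat.strong_induction_on with
  | _ t ih =>
    intro left right ans hmeas hleft hright hbelow habove hans
    rw [pvLoopA]
    split
    case isTrue hlr =>
      have hmid := PySem.Int.floordiv_two_mid_bounds (lo := left) (hi := right) hlr
      set mid := PySem.Int.floordiv (left + right) 2 with hmid_def
      dsimp only
      have hstdef : (lengths.foldl (pvStepA mid) (0, 0)).1 = pvStops mid lengths := rfl
      split
      case isTrue hfeas =>
        rw [hstdef] at hfeas
        refine ih (mid - 1 + 1 - left).toNat (by omega) left (mid - 1) mid rfl hleft (by omega)
          hbelow ?_ ?_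
        · intro w hw _ _; omega
        · refine ⟨?_, by omega, by omega⟩
          have := pvStops_nonneg mid lengths
          omega
      case isFalse hinf =>
        rw [hstdef] at hinf
        refine ih (right + 1 - (mid + 1)).toNat (by omega) (mid + 1) right ans rfl (by omega)
          hright ?_ habove hans
        intro w hw hwlt hfw
        by_cases hcase : w < left
        · exact hbelow w hw hcase hfw
        · -- left ≤ w ≤ mid: the stop count at mid is at most the one at w
          have hanti := pvStops_anti w mid (by omega) lengths hnn
          omega
    case isFalse hlr =>
      refine ⟨hans.1, hans.2.1, hans.2.2, fun w hw hfw => ?_⟩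
      by_cases hcase : w < left
      · exact absurd hfw (hbelow w hw hcase)
      · exact habove w (by omega) hw hfw


-- ---- one-element lists: both programs return the single length ----

theorem pvLoopA_single (s x : Int) : pvLoopA s [x] x x x = x := by
  rw [pvLoopA]
  rw [dif_pos (le_refl x)]
  have hmid : PySem.Int.floordiv (x + x) 2 = x := by
    rw [PySem.Int.floordiv_eq_ediv_of_pos (by omega)]
    omega
  have hst : (([x] : List Int).foldl (pvStepA (PySem.Int.floordiv (x + x) 2)) (0, 0)).1 = 0 := by
    rw [hmid]
    simp only [List.foldl_cons, List.foldl_nil]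
    rw [pvStepA_go x (0, 0) x (by simp)]
  simp only [hst]
  split
  · rw [hmid, pvLoopA, dif_neg (by omega)]
  · rw [hmid, pvLoopA, dif_neg (by omega)]

theorem pvAlt_single (n s x : Int) : min_car_range_alt n s [x] = x := by
  simp only [min_car_range_alt]
  have hlen : (([x] : List Int).length : Int) = 1 := by simp
  rw [hlen]
  have hk : (if (if s + 1 < 1 then (1 : Int) else s + 1) > 1 then (1 : Int)
      else (if s + 1 < 1 then (1 : Int) else s + 1)) = 1 := by
    split_ifs <;> omega
  rw [hk]
  have hrange : PySem.List.pyRange 1 1 1 = [] := by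
    rw [PySem.List.pyRange_one]; simp
  rw [hrange, List.foldl_nil, pvPreB_tail]
  norm_num

-- ===== VERDICT (by name: the statement is the Claim_ definition above) =====
theorem min_car_range_spec : Claim_equal_min_car_range := by
  intro n s lengths _hdom hpre
  obtain ⟨hne, hdisj⟩ := hpre
  unfold Spec_min_car_range
  rcases hmx : PySem.List.max? lengths (fun y => y) with _ | M
  · rw [PySem.List.max?_eq_none_iff] at hmx
    exact absurd hmx hne
  have hmax : ∀ x ∈ lengths, x ≤ M := fun x hx => PySem.List.max?_isMax hmx x hx
  have hmem : M ∈ lengths := PySem.List.max?_mem hmx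
  have hA : min_car_range n s lengths = pvLoopA s lengths M lengths.sum lengths.sum := by
    simp only [min_car_range, hmx]
  rw [hA]
  by_cases hnn : ∀ x ∈ lengths, 0 ≤ x
  · -- nonnegative lengths: both sides are the optimum over ≤ s+1 segments
    have hMsum : M ≤ lengths.sum := List.single_le_sum hnn M hmem
    have hsum0 : pvStops lengths.sum lengths = 0 := pvStops_of_sum_le _ _ hnn (le_refl _)
    have hAfacts := pvLoopA_main s lengths M hnn hmax (lengths.sum + 1 - M).toNat
      M lengths.sum lengths.sum rfl (le_refl M) (le_refl _)
      (fun w hw hlt _ => by omega)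
      (fun w hgt _ _ => by omega)
      ⟨by omega, hMsum, le_refl _⟩
    obtain ⟨hstA, hMA, hAsum, hminA⟩ := hAfacts
    set a := pvLoopA s lengths M lengths.sum lengths.sum with ha
    have hB := pvAlt_best n s lengths hne hnn
    set b := min_car_range_alt n s lengths with hb
    obtain ⟨⟨hbel, hbst⟩, hbmin⟩ := hB
    have hm1 : 1 ≤ lengths.length := List.length_pos_of_ne_nil hne
    obtain ⟨x0, t0, hxt⟩ := List.exists_cons_of_ne_nil hne
    -- the greedy count at a is within every version of the segment budget
    have hlenA : pvStops a lengths ≤ (t0.length : Int) := by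
      rw [hxt]
      exact_mod_cast pvStops_le_len a x0 t0 (le_trans (hmax x0 (by rw [hxt]; simp)) hMA)
    have hlen_eq : lengths.length = t0.length + 1 := by rw [hxt]; simp
    have hba : b ≤ a := by
      refine hbmin a ⟨fun x hx => le_trans (hmax x hx) hMA, ?_⟩
      unfold pvK
      dsimp only
      split_ifs <;> push_cast [hlen_eq] at * <;> omega
    have hab : a ≤ b := by
      by_cases hs0 : 0 ≤ s
      · -- the budget bound pvK ≤ s+1 makes b feasible with at most s stops
        have hKle : pvK s lengths ≤ s + 1 := by
          unfold pvK; dsimp only; split_ifs <;> omega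
        have hMb : M ≤ b := hbel M hmem
        have hfb : pvStops b lengths ≤ s := by omega
        exact hminA b hMb hfb
      · -- s < 0: the budget is 1, so b carries the whole sum
        have hK1 : pvK s lengths = 1 := by
          unfold pvK; dsimp only; split_ifs <;> omega
        have hst0 : pvStops b lengths = 0 := by
          have := pvStops_nonneg b lengths
          rw [hK1] at hbst
          omega
        have hsb : lengths.sum ≤ b := by
          rw [hxt] at hst0 ⊢
          exact pvStops_zero_sum b x0 t0 (fun y hy => hbel y (by rw [hxt]; exact hy)) hst0
        omega
    omega
  · -- a negative length occurs, so by Pre_ the list is a singleton or s ≤ 0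
    have hd2 : lengths.length = 1 ∨ s ≤ 0 := by
      rcases hdisj with h | h | h
      · exact Or.inl h
      · exact Or.inr h
      · exact absurd h hnn
    rcases hd2 with h1 | hs
    · obtain ⟨x, rfl⟩ := List.length_eq_one_iff.mp h1
      have hMx : M = x := by simpa using hmem
      rw [pvAlt_single]
      subst hMx
      simpa using pvLoopA_single s M
    · rw [pvAlt_sum n s lengths hne hs]
      exact pvLoopA_sum s lengths M hs hmax hne (lengths.sum + 1 - M).toNat M lengths.sum rfl
        (le_refl M) (le_refl _)
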